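-- pv_equiv track=rewrite | github.com/CryingPlusPlus/OldStuff | InfStuff/Viginere/viginere.py | key_in_length
-- ===== SOURCE A (Python) =====
-- a = ['a', 'b', 'c', 'd', 'e', 'f', 'g', 'h', 'i', 'j', 'k', 'l', 'm', 'n', 'o', 'p', 'q', 'r', 's', 't', 'u', 'v', 'w',
--      'x', 'y', 'z', ' ']
--
-- len = len(a)
--
-- def letter_to_nmb(letter):
--     for i in range(0, len):
--         if letter == a[i]:
--             return i
--
-- def str_to_nmb_arr(s):
--     s_list = list(s)
--     arr = []
--     for chars in s_list:
--         arr.append(letter_to_nmb(chars))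
--     return arr
--
-- def key_in_length(b_word, b_key):
--     end_key = str_to_nmb_arr(b_key)
--     word = str_to_nmb_arr(b_word)
--
--     if end_key.__len__() < word.__len__():
--         k = end_key
--         for i in range(0, (word.__len__() - end_key.__len__())):
--             end_key.extend(k)
--     while end_key.__len__() > word.__len__():
--         end_key.pop()
--     return end_key
-- ===== SOURCE B (Python) =====
-- ALPHABET = 'abcdefghijklmnopqrstuvwxyz '
-- _IDX = {c: i for i, c in enumerate(ALPHABET)}
--
--
-- def key_in_length(b_word, b_key):
--     key_vals = [_IDX[c] for c in b_key]
--     k = len(key_vals)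
--     return [key_vals[i % k] for i in range(len(b_word))]
-- ===== Notes on version B (the rewrite author's own statement) =====
-- stated objective: faster
-- what changed: A tiles the key by repeatedly extending the list with itself (exponential doubling) and then popping back down to the word length, with a linear alphabet scan per letter; B precomputes a letter->index dict once and builds the result directly by cyclic indexing key_vals[i % k] for i in range(len(b_word)).
-- outside the precondition, e.g. on key_in_length('ab', ''): A returns [], B raises ZeroDivisionError; on key_in_length('a', 'A'): A returns [None], B raises KeyError
import Mathlib
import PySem

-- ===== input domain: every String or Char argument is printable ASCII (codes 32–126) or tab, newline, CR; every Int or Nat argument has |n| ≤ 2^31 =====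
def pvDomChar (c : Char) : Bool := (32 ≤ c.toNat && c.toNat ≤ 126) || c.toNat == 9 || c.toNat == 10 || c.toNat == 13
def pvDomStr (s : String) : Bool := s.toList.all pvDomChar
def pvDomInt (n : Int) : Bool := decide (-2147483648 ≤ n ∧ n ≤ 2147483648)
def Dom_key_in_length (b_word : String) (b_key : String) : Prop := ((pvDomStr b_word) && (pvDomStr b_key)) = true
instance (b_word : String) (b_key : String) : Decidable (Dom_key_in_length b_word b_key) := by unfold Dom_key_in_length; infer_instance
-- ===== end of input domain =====

-- B replaces A's exponential extend-with-self/pop tiling by direct cyclic indexing key[i % k]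
-- with a dict for letter lookup (measured faster, asymptotic change); return value only.

-- ===== PORT A =====
-- module constant a
def pvAlph : List Char :=
  ['a','b','c','d','e','f','g','h','i','j','k','l','m','n','o','p','q','r','s','t','u','v','w','x','y','z',' ']

-- for i in range(0, 27): if letter == a[i]: return i   (falls through → None)
def letter_to_nmb (letter : Char) : Option Int :=
  (PySem.List.pyRange 0 27 1).findSome?
    (fun i => if letter = PySem.List.pyGetD pvAlph i ' ' then some i else none)

-- arr = []; for chars in s_list: arr.append(letter_to_nmb(chars))
def str_to_nmb_arr (s : String) : List (Option Int) :=
  s.toList.foldl (fun arr c => arr ++ [letter_to_nmb c]) []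

-- while end_key.__len__() > word_len: end_key.pop()
def pvPopWhile (ek : List (Option Int)) (wlen : Nat) : List (Option Int) :=
  if wlen < ek.length then pvPopWhile ek.dropLast wlen else ek
termination_by ek.length
decreasing_by simp [List.length_dropLast]; omega

def key_in_length (b_word : String) (b_key : String) : List Int :=
  let end_key := str_to_nmb_arr b_key
  let word := str_to_nmb_arr b_word
  let end_key2 :=
    if end_key.length < word.length then
      -- k = end_key (alias!); each extend(k) appends the CURRENT end_key, i.e. doubles it
      (List.range (word.length - end_key.length)).foldl (fun ek _ => ek ++ ek) end_key
    else end_key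
  -- Python returns the Option list itself; a key char outside the alphabet yields a None entry,
  -- which List Int cannot express — Pre_ excludes those, so the .getD 0 defaults are never used.
  (pvPopWhile end_key2 word.length).map (fun o => o.getD 0)

-- ===== PORT B =====
-- _IDX = {c: i for i, c in enumerate(ALPHABET)}
def pvAltIdx : PySem.Dict Char Int :=
  (PySem.List.enumerate "abcdefghijklmnopqrstuvwxyz ".toList 0).foldl
    (fun d p => d.insert p.2 p.1) PySem.Dict.empty

def key_in_length_alt (b_word : String) (b_key : String) : List Int :=
  -- _IDX[c] raises KeyError for a char outside the alphabet; Pre_ excludes those (default unused)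
  let key_vals := b_key.toList.map (fun c => pvAltIdx.getD c 0)
  let k := key_vals.length
  -- i % 0 raises ZeroDivisionError for an empty key with a nonempty word; Pre_ excludes that
  (PySem.List.pyRange 0 (PySem.Str.len b_word) 1).map
    (fun i => PySem.List.pyGetD key_vals (PySem.Int.mod i (k : Int)) 0)

-- ===== PRECONDITION & SPEC =====
-- Pre_ excludes (a) keys containing a char outside a..z/' ' (A returns a list containing None,
-- not a List Int; B raises KeyError) and (b) an empty key with a nonempty word (A accidentally
-- returns [] shorter than the word; B raises ZeroDivisionError).
def Pre_key_in_length (b_word : String) (b_key : String) : Prop :=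
  b_key.toList.all (fun c => pvAlph.contains c) = true ∧ (b_key ≠ "" ∨ b_word = "")
instance (b_word : String) (b_key : String) : Decidable (Pre_key_in_length b_word b_key) := by
  unfold Pre_key_in_length; infer_instance

def pvWitness_key_in_length : String × String := ("ab", "c")

def Spec_key_in_length (b_word : String) (b_key : String) (out : List Int) : Prop := out = key_in_length_alt b_word b_key
instance (b_word : String) (b_key : String) (out : List Int) : Decidable (Spec_key_in_length b_word b_key out) := by unfold Spec_key_in_length; infer_instance

-- ===== CLAIM (what is proved, stated in full; the proofs are below) =====
def Claim_equal_key_in_length : Prop := ∀ (b_word : String) (b_key : String), Dom_key_in_length b_word b_key → Pre_key_in_length b_word b_key → Spec_key_in_length b_word b_key (key_in_length b_word b_key)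

-- ===== LEMMAS AND PROOFS =====

-- each alphabet char gets the same number from A's linear scan and from B's dict
set_option maxRecDepth 100000 in
theorem pv_vals_agree_bool :
    pvAlph.all (fun c => letter_to_nmb c == some (pvAltIdx.getD c 0)) = true := by decide

theorem pv_vals_agree : ∀ c ∈ pvAlph, letter_to_nmb c = some (pvAltIdx.getD c 0) := by
  have h := pv_vals_agree_bool
  rw [List.all_eq_true] at h
  intro c hc
  exact eq_of_beq (h c hc)

theorem pv_str_to_nmb_arr_eq_map (s : String) :
    str_to_nmb_arr s = s.toList.map letter_to_nmb := by
  unfold str_to_nmb_arr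
  rw [PySem.List.foldl_append_singleton_eq_map]
  simp

theorem pv_popWhile_eq_take (ek : List (Option Int)) (wlen : Nat) :
    pvPopWhile ek wlen = ek.take wlen := by
  rw [pvPopWhile]
  split
  · rename_i h
    rw [pv_popWhile_eq_take ek.dropLast wlen, List.dropLast_eq_take, List.take_take]
    congr 1
    omega
  · rename_i h
    rw [List.take_of_length_le (by omega)]
termination_by ek.length
decreasing_by simp [List.length_dropLast]; omega

theorem pv_dbl_eq_flatten {α : Type} (d : Nat) (L : List α) :
    (List.range d).foldl (fun ek _ => ek ++ ek) L = (List.replicate (2 ^ d) L).flatten := by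
  induction d with
  | zero => simp
  | succ d ih =>
      rw [List.range_succ, List.foldl_append, ih, pow_succ, Nat.mul_two,
        List.replicate_add, List.flatten_append]
      simp

theorem pv_len_le (k n : Nat) (hk : 1 ≤ k) : n ≤ k * 2 ^ (n - k) := by
  by_cases h : n ≤ k
  · have h1 : 1 ≤ 2 ^ (n - k) := Nat.one_le_two_pow
    calc n ≤ k := h
    _ = k * 1 := (mul_one k).symm
    _ ≤ k * 2 ^ (n - k) := Nat.mul_le_mul_left k h1
  · have h1 : (n - k) + 1 ≤ 2 ^ (n - k) := Nat.lt_two_pow_self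
    have h2 : n - k ≤ k * (n - k) := Nat.le_mul_of_pos_left _ hk
    calc n = k + (n - k) := by omega
    _ ≤ k + k * (n - k) := by omega
    _ = k * ((n - k) + 1) := by ring
    _ ≤ k * 2 ^ (n - k) := Nat.mul_le_mul_left k h1

theorem pv_flatten_replicate_getElem? {α : Type} (K : List α) (m i : Nat)
    (hi : i < m * K.length) :
    ((List.replicate m K).flatten)[i]? = K[i % K.length]? := by
  induction m generalizing i with
  | zero => simp at hi
  | succ m ih =>
      have hexp : (m + 1) * K.length = K.length + m * K.length := by ring
      rw [hexp] at hi
      rw [List.replicate_succ, List.flatten_cons]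
      by_cases h : i < K.length
      · rw [List.getElem?_append_left h, Nat.mod_eq_of_lt h]
      · rw [List.getElem?_append_right (by omega), ih (i - K.length) (by omega)]
        congr 1
        conv_rhs => rw [show i = K.length + (i - K.length) from by omega]
        rw [Nat.add_mod_left]

-- ===== VERDICT (by name: the statement is the Claim_ definition above) =====
-- A's result as a closed form: tile the key values and truncate to the word length
theorem pv_A_eq (b_word b_key : String) (hkey : ∀ c ∈ b_key.toList, c ∈ pvAlph) :
    key_in_length b_word b_key =
      ((List.replicate
          (2 ^ (b_word.toList.length - (b_key.toList.map (fun c => pvAltIdx.getD c 0)).length))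
          (b_key.toList.map (fun c => pvAltIdx.getD c 0))).flatten).take b_word.toList.length := by
  have hkeyA : str_to_nmb_arr b_key =
      (b_key.toList.map (fun c => pvAltIdx.getD c 0)).map some := by
    rw [pv_str_to_nmb_arr_eq_map, List.map_map]
    exact List.map_congr_left (fun c hc => pv_vals_agree c (hkey c hc))
  set K := b_key.toList.map (fun c => pvAltIdx.getD c 0) with hKdef
  have hwlen : (str_to_nmb_arr b_word).length = b_word.toList.length := by
    rw [pv_str_to_nmb_arr_eq_map]; simp
  set n := b_word.toList.length with hndef
  simp only [key_in_length, hkeyA, hwlen]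
  have hif : (if (K.map some).length < n then
        (List.range (n - (K.map some).length)).foldl (fun ek _ => ek ++ ek) (K.map some)
      else K.map some)
      = (List.range (n - K.length)).foldl (fun ek _ => ek ++ ek) (K.map some) := by
    simp only [List.length_map]
    split
    · rfl
    · rename_i hle
      rw [show n - K.length = 0 from by omega, List.range_zero, List.foldl_nil]
  rw [hif, pv_dbl_eq_flatten, pv_popWhile_eq_take]
  rw [show List.replicate (2 ^ (n - K.length)) (K.map some)
        = (List.replicate (2 ^ (n - K.length)) K).map (List.map some) from by
      rw [List.map_replicate]]
  rw [← List.map_flatten, ← List.map_take, List.map_map]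
  simp

theorem key_in_length_spec : Claim_equal_key_in_length := by
  intro b_word b_key _ hpre
  obtain ⟨hkeyb, hor⟩ := hpre
  have hkey : ∀ c ∈ b_key.toList, c ∈ pvAlph := by
    intro c hc
    have := List.all_eq_true.mp hkeyb c hc
    simpa using this
  unfold Spec_key_in_length
  rw [pv_A_eq b_word b_key hkey]
  set K := b_key.toList.map (fun c => pvAltIdx.getD c 0) with hKdef
  set n := b_word.toList.length with hndef
  unfold key_in_length_alt
  simp only [List.length_map, PySem.Str.len_eq]
  rw [PySem.List.pyRange_zero_nat]
  by_cases hn : n = 0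
  · simp [hn]
    exact String.toList_eq_nil_iff.mp (List.length_eq_zero_iff.mp (by omega))
  · have hne : b_key ≠ "" := by
      rcases hor with h | h
      · exact h
      · exact absurd (by rw [hndef, h]; rfl) hn
    have hnil : b_key.toList ≠ [] := fun h => hne (String.toList_eq_nil_iff.mp h)
    have hk : 1 ≤ K.length := by
      have := List.length_pos_of_ne_nil hnil
      simp only [hKdef, List.length_map]
      omega
    have hle : n ≤ K.length * 2 ^ (n - K.length) := pv_len_le K.length n hk
    have hsl : b_word.length = n := by rw [hndef, String.length_toList]
    apply List.ext_getElem?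
    intro i
    by_cases hi : i < n
    · rw [List.getElem?_take_of_lt hi,
        pv_flatten_replicate_getElem? K (2 ^ (n - K.length)) i (by
          calc i < n := hi
          _ ≤ K.length * 2 ^ (n - K.length) := hle
          _ = 2 ^ (n - K.length) * K.length := Nat.mul_comm _ _)]
      have him : i % K.length < K.length := Nat.mod_lt _ (by omega)
      have hkl : b_key.toList.length = K.length := by simp [hKdef]
      rw [List.getElem?_eq_getElem him]
      conv_rhs => rw [List.map_map, List.getElem?_map, List.getElem?_range hi]
      simp only [Option.map_some, Function.comp]
      rw [hkl, PySem.Int.mod_natCast, PySem.List.pyGetD_natCast,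
        List.getD_eq_getElem K 0 him]
    · rw [List.getElem?_eq_none (by simp; omega),
        List.getElem?_eq_none (by simp; omega)]
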